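-- pv_equiv track=rewrite | github.com/doInfinitely/manga-translate | exhentai_helpers.py | choose_all
-- ===== SOURCE A (Python) =====
-- def choose_all(items, n):
--     if n == 0:
--         return set()
--     if n == 1:
--         return {frozenset({x}) for x in items}
--     output = set()
--     for x in choose_all(items, n-1):
--         for y in items:
--             if y not in x:
--                 output.add(frozenset(x | {y}))
--     return output
-- ===== SOURCE B (Python) =====
-- def choose_all(items, n):
--     if n == 0:
--         return set()
--     frontier = {frozenset()}
--     for _ in range(n):
--         frontier = {s | {y} for s in frontier for y in items if y not in s}
--     return frontier
-- ===== Notes on version B (the rewrite author's own statement) =====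
-- stated objective: alternative
-- what changed: Replaces A's recursion on the subset size (with a separate n==1 base case) by an iterative frontier starting from {frozenset()} that is rebuilt n times with a single set comprehension.
import Mathlib
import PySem

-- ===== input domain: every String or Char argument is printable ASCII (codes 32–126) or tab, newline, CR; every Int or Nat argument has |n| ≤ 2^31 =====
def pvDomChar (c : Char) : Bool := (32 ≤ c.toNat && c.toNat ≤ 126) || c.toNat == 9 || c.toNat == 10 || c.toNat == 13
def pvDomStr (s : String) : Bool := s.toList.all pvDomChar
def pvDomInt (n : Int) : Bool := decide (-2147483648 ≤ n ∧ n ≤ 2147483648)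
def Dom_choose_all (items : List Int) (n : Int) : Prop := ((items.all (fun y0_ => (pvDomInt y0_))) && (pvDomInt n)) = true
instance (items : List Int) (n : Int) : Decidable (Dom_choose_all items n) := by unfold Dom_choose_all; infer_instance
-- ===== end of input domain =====

-- B replaces A's recursion on the subset size by an iterative frontier/set-comprehension
-- build-up of the same recurrence (objective: alternative decomposition, no speed claim).

-- ===== PORT A =====
-- shared model of a frozenset of ints: its canonical sorted duplicate-free element list;
-- fzAdd s y models 'frozenset(s | {y})' (s canonical, y possibly new)
def fzAdd (s : List Int) (y : Int) : List Int :=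
  PySem.List.sorted (PySem.Set.add s y) (fun x => x) false

-- literal transliteration of A's recursion (on the Nat value of n; Python raises for n < 0)
def chooseAllA (items : List Int) : Nat → List (List Int)
  | 0 => []
  | 1 => PySem.Set.ofList (items.map (fun x => [x]))
  | k+2 =>
      (chooseAllA items (k+1)).foldl
        (fun output x =>
          items.foldl
            (fun output y => if y ∈ x then output else PySem.Set.add output (fzAdd x y))
            output)
        []

def choose_all (items : List Int) (n : Int) : List (List Int) := chooseAllA items n.toNat

-- ===== PORT B =====
-- one comprehension pass: {s | {y} for s in frontier for y in items if y not in s}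
def stepB (items : List Int) (frontier : List (List Int)) : List (List Int) :=
  PySem.Set.ofList
    (frontier.flatMap (fun s =>
      (items.filter (fun y => !decide (y ∈ s))).map (fun y => fzAdd s y)))

def choose_all_alt (items : List Int) (n : Int) : List (List Int) :=
  if n = 0 then []
  else (List.range n.toNat).foldl (fun frontier _ => stepB items frontier) [[]]

-- ===== PRECONDITION & SPEC =====
-- Pre_ excludes n < 0, on which Python A recurses without a base case and raises RecursionError.
def Pre_choose_all (items : List Int) (n : Int) : Prop := 0 ≤ n
instance (items : List Int) (n : Int) : Decidable (Pre_choose_all items n) := by unfold Pre_choose_all; infer_instance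
def pvWitness_choose_all : List Int × Int := ([1, 2, 3], 2)

def Spec_choose_all (items : List Int) (n : Int) (out : List (List Int)) : Prop := out = choose_all_alt items n
instance (items : List Int) (n : Int) (out : List (List Int)) : Decidable (Spec_choose_all items n out) := by unfold Spec_choose_all; infer_instance

-- ===== CLAIM (what is proved, stated in full; the proofs are below) =====
def Claim_equal_choose_all : Prop := ∀ (items : List Int) (n : Int), Dom_choose_all items n → Pre_choose_all items n → Spec_choose_all items n (choose_all items n)

-- ===== LEMMAS AND PROOFS =====

theorem fzAdd_nil (y : Int) : fzAdd [] y = [y] := by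
  show PySem.List.sorted [y] (fun x => x) false = [y]
  apply PySem.List.sorted_eq_self_of_pairwise
  exact List.pairwise_singleton _ _

-- B's comprehension pass equals A's nested accumulating loop
theorem stepB_eq_loop (items : List Int) (fr : List (List Int)) :
    stepB items fr =
      fr.foldl
        (fun output x =>
          items.foldl
            (fun output y => if y ∈ x then output else PySem.Set.add output (fzAdd x y))
            output)
        [] := by
  unfold stepB
  rw [PySem.Set.ofList_eq_foldl]
  generalize ([] : List (List Int)) = acc
  induction fr generalizing acc with
  | nil => rfl
  | cons s fr ih =>
      simp only [List.flatMap_cons, List.foldl_append, List.foldl_cons, ih]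
      congr 1
      rw [List.foldl_map, List.foldl_filter]
      apply PySem.List.foldl_congr_mem
      intro a y _
      by_cases h : y ∈ s <;> simp [h]

theorem chooseAllA_eq_iter (items : List Int) :
    ∀ k : Nat, chooseAllA items (k+1) =
      (List.range (k+1)).foldl (fun frontier _ => stepB items frontier) [[]] := by
  intro k
  induction k with
  | zero =>
      rw [List.range_one, List.foldl_cons, List.foldl_nil, stepB_eq_loop]
      show PySem.Set.ofList (items.map (fun x => [x])) = _
      rw [PySem.Set.ofList_eq_foldl, List.foldl_map, List.foldl_cons, List.foldl_nil]
      apply PySem.List.foldl_congr_mem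
      intro a y _
      simp [fzAdd_nil, PySem.Set.add]
  | succ k ih =>
      rw [List.range_succ, List.foldl_append, List.foldl_cons, List.foldl_nil, ← ih]
      rw [stepB_eq_loop]
      rfl

-- ===== VERDICT (by name: the statement is the Claim_ definition above) =====
theorem choose_all_spec : Claim_equal_choose_all := by
  intro items n _ hpre
  unfold Spec_choose_all choose_all choose_all_alt
  by_cases h : n = 0
  · simp [h, chooseAllA]
  · have hn : 0 < n := lt_of_le_of_ne hpre (Ne.symm h)
    obtain ⟨k, hk⟩ : ∃ k : Nat, n.toNat = k + 1 := by
      refine ⟨n.toNat - 1, ?_⟩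
      omega
    rw [if_neg h, hk, chooseAllA_eq_iter]
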